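-- pv_equiv track=rewrite | github.com/Andy46/adventofcode | 2024/12_GardenGroups/part2.py | constructRegion
-- ===== SOURCE A (Python) =====
-- def constructRegion(plant, region):
--     minX = min([cell[1] for cell in region])
--     maxX = max([cell[1] for cell in region])
--     minY = min([cell[0] for cell in region])
--     maxY = max([cell[0] for cell in region])
--
--     deltaX = (maxX - minX)
--     deltaY = (maxY - minY)
--
--     regionMap = []
--     for y in range(deltaY + 1):
--         row = []
--         for x in range(deltaX + 1):
--             row.append(None)
--         regionMap.append(row)
--
--     for cell in region:
--         x = ((cell[1] - minX))
--         y = ((cell[0] - minY))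
--         regionMap[y][x] = plant
--     return regionMap
-- ===== SOURCE B (Python) =====
-- def constructRegion(plant, region):
--     minY = min(cell[0] for cell in region)
--     minX = min(cell[1] for cell in region)
--     maxY = max(cell[0] for cell in region)
--     maxX = max(cell[1] for cell in region)
--     cells = {(y - minY, x - minX) for (y, x) in region}
--     return [[plant if (y, x) in cells else None
--              for x in range(maxX - minX + 1)]
--             for y in range(maxY - minY + 1)]
-- ===== Notes on version B (the rewrite author's own statement) =====
-- stated objective: alternative
-- what changed: A scatter-fills a preallocated None grid by assigning plant at each region cell; B builds a set of normalized offsets once and gathers, constructing every grid cell directly by membership test.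
import Mathlib
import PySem

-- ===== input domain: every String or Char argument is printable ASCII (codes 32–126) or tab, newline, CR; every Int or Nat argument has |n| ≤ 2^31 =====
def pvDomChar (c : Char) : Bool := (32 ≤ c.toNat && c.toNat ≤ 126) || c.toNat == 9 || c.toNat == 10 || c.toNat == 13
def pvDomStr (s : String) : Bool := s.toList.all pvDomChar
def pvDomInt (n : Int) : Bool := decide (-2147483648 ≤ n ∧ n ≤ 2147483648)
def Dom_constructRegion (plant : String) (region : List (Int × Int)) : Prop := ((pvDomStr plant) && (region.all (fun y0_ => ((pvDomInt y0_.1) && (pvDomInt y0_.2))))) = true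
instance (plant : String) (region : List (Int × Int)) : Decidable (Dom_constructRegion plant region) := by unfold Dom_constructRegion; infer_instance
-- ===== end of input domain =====

-- B replaces A's scatter-fill of a preallocated None grid by a gather pass over all
-- output coordinates backed by a set of normalized region offsets (alternative decomposition).

-- ===== PORT A =====
-- literal transliteration of A: min/max of the mapped coordinate lists, a nested
-- append-loop building the None grid, then a scatter fold assigning plant at each cell.
-- (regionMap[y][x] = plant: y,x are provably nonnegative and in range for a nonempty
-- region, so pyGetD/pySetD are exact here.)
def constructRegion (plant : String) (region : List (Int × Int)) : List (List (Option String)) :=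
  match PySem.List.min? (region.map (fun c => c.2)) (fun v => v),
        PySem.List.max? (region.map (fun c => c.2)) (fun v => v),
        PySem.List.min? (region.map (fun c => c.1)) (fun v => v),
        PySem.List.max? (region.map (fun c => c.1)) (fun v => v) with
  | some minX, some maxX, some minY, some maxY =>
      let deltaX := maxX - minX
      let deltaY := maxY - minY
      let regionMap : List (List (Option String)) :=
        (PySem.List.pyRange 0 (deltaY + 1) 1).foldl
          (fun acc _ =>
            acc ++ [(PySem.List.pyRange 0 (deltaX + 1) 1).foldl
                      (fun row _ => row ++ [(none : Option String)]) []]) []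
      region.foldl
        (fun m c =>
          let x := c.2 - minX
          let y := c.1 - minY
          PySem.List.pySetD m y
            (PySem.List.pySetD (PySem.List.pyGetD m y []) x (some plant)))
        regionMap
  | _, _, _, _ => []  -- unreachable under Pre_ (min() raises ValueError on empty region)

-- ===== PORT B =====
def constructRegion_alt (plant : String) (region : List (Int × Int)) : List (List (Option String)) :=
  match PySem.List.min? (region.map (fun c => c.1)) (fun v => v) with
  | none => []  -- unreachable under Pre_ (min() raises ValueError on empty region)
  | some minY =>
  match PySem.List.min? (region.map (fun c => c.2)) (fun v => v) with
  | none => []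
  | some minX =>
  match PySem.List.max? (region.map (fun c => c.1)) (fun v => v) with
  | none => []
  | some maxY =>
  match PySem.List.max? (region.map (fun c => c.2)) (fun v => v) with
  | none => []
  | some maxX =>
      let cells : PySem.Set (Int × Int) :=
        PySem.Set.ofList (region.map (fun c => (c.1 - minY, c.2 - minX)))
      (PySem.List.pyRange 0 (maxY - minY + 1) 1).map (fun y =>
        (PySem.List.pyRange 0 (maxX - minX + 1) 1).map (fun x =>
          if PySem.Set.contains cells (y, x) then some plant else none))

-- ===== PRECONDITION & SPEC =====
-- Pre_ excludes the empty region, on which A (and B) raise ValueError from min().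
def Pre_constructRegion (plant : String) (region : List (Int × Int)) : Prop := region ≠ []
instance (plant : String) (region : List (Int × Int)) : Decidable (Pre_constructRegion plant region) := by unfold Pre_constructRegion; infer_instance
def pvWitness_constructRegion : String × (List (Int × Int)) := ("A", [(0, 0), (1, 2)])

def Spec_constructRegion (plant : String) (region : List (Int × Int)) (out : List (List (Option String))) : Prop := out = constructRegion_alt plant region
instance (plant : String) (region : List (Int × Int)) (out : List (List (Option String))) : Decidable (Spec_constructRegion plant region out) := by unfold Spec_constructRegion; infer_instance

-- ===== CLAIM (what is proved, stated in full; the proofs are below) =====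
def Claim_equal_constructRegion : Prop := ∀ (plant : String) (region : List (Int × Int)), Dom_constructRegion plant region → Pre_constructRegion plant region → Spec_constructRegion plant region (constructRegion plant region)

-- ===== LEMMAS AND PROOFS =====

-- setting index i (0 ≤ i < n) of a grid row/grid in map-over-range form
lemma pySetD_map_pyRange {α : Type} (f : Int → α) (n i : Int) (v : α)
    (h0 : 0 ≤ i) (hn : i < n) :
    PySem.List.pySetD ((PySem.List.pyRange 0 n 1).map f) i v
      = (PySem.List.pyRange 0 n 1).map (fun j => if j = i then v else f j) := by
  rw [PySem.List.pySetD_of_nonneg _ _ h0]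
  apply List.ext_getElem
  · simp
  · intro k hk _
    simp only [List.getElem_set, List.getElem_map, PySem.List.getElem_pyRange_one]
    have hkn : (k : Int) < n := by
      have := hk; simp [PySem.List.length_pyRange_one] at this; omega
    by_cases hki : k = i.toNat
    · subst hki; simp [Int.toNat_of_nonneg h0]
    · have hik : i.toNat ≠ k := by omega
      simp [hik]
      intro h
      exact absurd h (by omega)

-- the scatter fold over a grid in map-over-range form equals the gathered grid
lemma scatter_eq_gather (v : Option String) (minY minX H W : Int)
    (l : List (Int × Int))
    (hl : ∀ c ∈ l, 0 ≤ c.1 - minY ∧ c.1 - minY < H ∧ 0 ≤ c.2 - minX ∧ c.2 - minX < W) :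
    ∀ f : Int → Int → Option String,
    l.foldl
      (fun m c =>
        PySem.List.pySetD m (c.1 - minY)
          (PySem.List.pySetD (PySem.List.pyGetD m (c.1 - minY) []) (c.2 - minX) v))
      ((PySem.List.pyRange 0 H 1).map (fun y => (PySem.List.pyRange 0 W 1).map (fun x => f y x)))
    = (PySem.List.pyRange 0 H 1).map (fun y => (PySem.List.pyRange 0 W 1).map (fun x =>
        if (y, x) ∈ l.map (fun c => (c.1 - minY, c.2 - minX)) then v else f y x)) := by
  induction l with
  | nil => intro f; simp
  | cons c rest ih =>
    intro f
    obtain ⟨h0, h1, h2, h3⟩ := hl c (List.mem_cons_self ..)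
    have hrest : ∀ c' ∈ rest, 0 ≤ c'.1 - minY ∧ c'.1 - minY < H ∧ 0 ≤ c'.2 - minX ∧ c'.2 - minX < W :=
      fun c' hc' => hl c' (List.mem_cons_of_mem _ hc')
    simp only [List.foldl_cons]
    have hget : PySem.List.pyGetD
        ((PySem.List.pyRange 0 H 1).map (fun y => (PySem.List.pyRange 0 W 1).map (fun x => f y x)))
        (c.1 - minY) ([] : List (Option String))
        = (PySem.List.pyRange 0 W 1).map (fun x => f (c.1 - minY) x) :=
      PySem.List.pyGetD_map_pyRange_of_nonneg _ _ _ _ h0 h1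
    rw [hget, pySetD_map_pyRange _ _ _ _ h2 h3, pySetD_map_pyRange _ _ _ _ h0 h1]
    have hstep :
        (PySem.List.pyRange 0 H 1).map (fun j =>
            if j = c.1 - minY then (PySem.List.pyRange 0 W 1).map
              (fun x => if x = c.2 - minX then v else f (c.1 - minY) x)
            else (PySem.List.pyRange 0 W 1).map (fun x => f j x))
        = (PySem.List.pyRange 0 H 1).map (fun y => (PySem.List.pyRange 0 W 1).map (fun x =>
            (fun y' x' => if y' = c.1 - minY ∧ x' = c.2 - minX then v else f y' x') y x)) := by
      apply List.map_congr_left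
      intro y _
      by_cases hy : y = c.1 - minY
      · subst hy
        simp only []
        apply List.map_congr_left
        intro x _
        by_cases hx : x = c.2 - minX <;> simp [hx]
      · simp only [if_neg hy]
        apply List.map_congr_left
        intro x _
        simp [hy]
    rw [hstep, ih hrest]
    apply List.map_congr_left
    intro y _
    apply List.map_congr_left
    intro x _
    by_cases hmem : (y, x) ∈ rest.map (fun c => (c.1 - minY, c.2 - minX))
    · simp [hmem]
    · by_cases hc : y = c.1 - minY ∧ x = c.2 - minX
      · simp [hc, Prod.ext_iff]
      · have : ¬ ((y, x) = (c.1 - minY, c.2 - minX)) := by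
          simp [Prod.ext_iff]; tauto
        simp [hmem, hc, this]

-- ===== VERDICT (by name: the statement is the Claim_ definition above) =====
theorem constructRegion_spec : Claim_equal_constructRegion := by
  intro plant region _ hpre
  unfold Spec_constructRegion constructRegion constructRegion_alt
  obtain ⟨a, tl, rfl⟩ : ∃ a tl, region = a :: tl := by
    cases region with
    | nil => exact absurd rfl hpre
    | cons a tl => exact ⟨a, tl, rfl⟩
  simp only [List.map_cons, PySem.List.min?_id_cons, PySem.List.max?_id_cons]
  set minX := ((tl.map (fun c => c.2)).foldl min a.2) with hminX
  set maxX := ((tl.map (fun c => c.2)).foldl max a.2) with hmaxX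
  set minY := ((tl.map (fun c => c.1)).foldl min a.1) with hminY
  set maxY := ((tl.map (fun c => c.1)).foldl max a.1) with hmaxY
  have hminX' : PySem.List.min? ((a :: tl).map (fun c => c.2)) (fun v => v) = some minX := by
    simp [PySem.List.min?_id_cons, hminX]
  have hmaxX' : PySem.List.max? ((a :: tl).map (fun c => c.2)) (fun v => v) = some maxX := by
    simp [PySem.List.max?_id_cons, hmaxX]
  have hminY' : PySem.List.min? ((a :: tl).map (fun c => c.1)) (fun v => v) = some minY := by
    simp [PySem.List.min?_id_cons, hminY]
  have hmaxY' : PySem.List.max? ((a :: tl).map (fun c => c.1)) (fun v => v) = some maxY := by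
    simp [PySem.List.max?_id_cons, hmaxY]
  have hbounds : ∀ c ∈ a :: tl, 0 ≤ c.1 - minY ∧ c.1 - minY < maxY - minY + 1 ∧
      0 ≤ c.2 - minX ∧ c.2 - minX < maxX - minX + 1 := by
    intro c hc
    have h1 := PySem.List.min?_isMin hminY' c.1 (List.mem_map_of_mem hc)
    have h2 := PySem.List.max?_isMax hmaxY' c.1 (List.mem_map_of_mem hc)
    have h3 := PySem.List.min?_isMin hminX' c.2 (List.mem_map_of_mem hc)
    have h4 := PySem.List.max?_isMax hmaxX' c.2 (List.mem_map_of_mem hc)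
    
    omega
  -- initial grid in map-over-range form
  rw [PySem.List.foldl_append_singleton_eq_map, PySem.List.foldl_append_singleton_eq_map]
  simp only [List.nil_append]
  rw [scatter_eq_gather (some plant) minY minX (maxY - minY + 1) (maxX - minX + 1)
        (a :: tl) hbounds (fun _ _ => none)]
  apply List.map_congr_left
  intro y _
  apply List.map_congr_left
  intro x _
  have hiff : (PySem.Set.ofList ((a :: tl).map (fun c => (c.1 - minY, c.2 - minX)))).contains (y, x) = true
      ↔ (y, x) ∈ (a :: tl).map (fun c => (c.1 - minY, c.2 - minX)) := by
    simp [PySem.Set.contains_iff, PySem.Set.mem_ofList]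
  simp only [List.map_cons] at hiff ⊢
  by_cases hmem : (y, x) ∈ (a.1 - minY, a.2 - minX) :: tl.map (fun c => (c.1 - minY, c.2 - minX))
  · simp [hmem, hiff.mpr hmem]
  · have hc := mt hiff.mp hmem
    simp [hmem, hc]
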